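-- pv_equiv track=rewrite | github.com/ZBanayazdi/VfivejorBjor | Model/convert_to_persian_numbers.py | price_digits_converter
-- ===== SOURCE A (Python) =====
-- def price_digits_converter(text):
--     """تبدیل اعداد به فارسی با فرمت صحیح قیمت"""
--     persian_numbers = {
--         '0': '۰',
--         '1': '۱',
--         '2': '۲',
--         '3': '۳',
--         '4': '۴',
--         '5': '۵',
--         '6': '۶',
--         '7': '۷',
--         '8': '۸',
--         '9': '۹',
--     }
--
--     if not isinstance(text, str):
--         text = str(text)
--     # تبدیل به تومان (حذف صفر آخر)
--     if len(text) > 1: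
--         text = text[:-1]
--     # حذف هرچیزی بجز اعداد
--     num = ''.join(filter(str.isdigit, text))
--
--     # تبدیل به عدد فارسی
--     result = ''
--     for i, digit in enumerate(num):
--         result += persian_numbers[digit]
--         # اضافه کردن ٬ بعد از هر سه رقم از سمت راست
--         if i < len(num) - 1 and (len(num) - i - 1) % 3 == 0:
--             result += '٬'
--
--     return result
-- ===== SOURCE B (Python) =====
-- def price_digits_converter(text):
--     """تبدیل اعداد به فارسی با فرمت صحیح قیمت"""
--     if not isinstance(text, str):
--         text = str(text)
--     # تبدیل به تومان (حذف صفر آخر)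
--     if len(text) > 1:
--         text = text[:-1]
--     # حذف هرچیزی بجز اعداد
--     num = ''.join(c for c in text if c.isdigit())
--     # map every digit to its Persian form in one pass
--     mapped = num.translate(str.maketrans('0123456789', '۰۱۲۳۴۵۶۷۸۹'))
--     # group into threes from the right: reverse, chunk, join, reverse back
--     rev = mapped[::-1]
--     chunks = [rev[k:k + 3] for k in range(0, len(rev), 3)]
--     return '٬'.join(chunks)[::-1]
-- ===== Notes on version B (the rewrite author's own statement) =====
-- stated objective: idiomatic
-- what changed: A interleaves separators inside the digit loop via a per-index modular test; B first maps all digits to Persian in one translate pass, then groups the result into threes from the right (reverse, chunk by 3, join with '٬', reverse back).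
import Mathlib
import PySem

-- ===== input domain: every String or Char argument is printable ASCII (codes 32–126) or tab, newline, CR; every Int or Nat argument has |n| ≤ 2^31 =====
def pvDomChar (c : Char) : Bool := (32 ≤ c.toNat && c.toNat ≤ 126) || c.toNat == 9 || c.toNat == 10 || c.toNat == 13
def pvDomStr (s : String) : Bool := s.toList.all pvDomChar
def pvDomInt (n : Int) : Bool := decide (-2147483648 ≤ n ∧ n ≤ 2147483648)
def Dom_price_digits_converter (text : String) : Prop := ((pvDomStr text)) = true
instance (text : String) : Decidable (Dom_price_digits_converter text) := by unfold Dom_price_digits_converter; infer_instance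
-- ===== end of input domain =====

-- B replaces A's per-index modular separator loop by a map over the digits followed by
-- right-to-left chunking into threes joined with '٬' (idiomatic decomposition; same cost).

-- ===== PORT A =====
-- the dict literal persian_numbers
def pvPersianNumbers : PySem.Dict Char String :=
  PySem.Dict.mk [('0',"۰"),('1',"۱"),('2',"۲"),('3',"۳"),('4',"۴"),
                 ('5',"۵"),('6',"۶"),('7',"۷"),('8',"۸"),('9',"۹")]

-- the 'for i, digit in enumerate(num)' loop of A (dict lookup via getD: every
-- digit of num is a key of the dict, so the KeyError branch is unreachable)
def pvALoop (num : String) : String :=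
  (PySem.List.enumerate num.toList 0).foldl
    (fun result p =>
      let result := result ++ PySem.Dict.getD pvPersianNumbers p.2 ""
      if p.1 < PySem.Str.len num - 1 ∧ PySem.Int.mod (PySem.Str.len num - p.1 - 1) 3 = 0
      then result ++ "٬" else result)
    ""

def price_digits_converter (text : String) : String :=
  -- 'if not isinstance(text, str)' is always false here: text is a str
  let text' := if 1 < PySem.Str.len text then PySem.Str.slice text none (some (-1)) else text
  -- ''.join(filter(str.isdigit, text))
  pvALoop (String.ofList (text'.toList.filter PySem.Chars.isdigit))

-- ===== PORT B =====
-- str.maketrans('0123456789', '۰۱۲۳۴۵۶۷۸۹'): translation table, unmapped chars unchanged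
def pvMaketrans (c : Char) : Char :=
  if c = '0' then '۰' else if c = '1' then '۱' else if c = '2' then '۲'
  else if c = '3' then '۳' else if c = '4' then '۴' else if c = '5' then '۵'
  else if c = '6' then '۶' else if c = '7' then '۷' else if c = '8' then '۸'
  else if c = '9' then '۹' else c

-- [rev[k:k+3] for k in range(0, len(rev), 3)]: successive 3-slices
def pvChunks3 : List Char → List (List Char)
  | [] => []
  | a :: rest => ((a :: rest).take 3) :: pvChunks3 (rest.drop 2)
  termination_by l => l.length
  decreasing_by simp

-- rev = mapped[::-1]; chunks; return '٬'.join(chunks)[::-1]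
def pvBGroup (mapped : List Char) : String :=
  String.ofList (PySem.Chars.join ['٬'] (pvChunks3 mapped.reverse)).reverse

def price_digits_converter_alt (text : String) : String :=
  let text' := if 1 < PySem.Str.len text then PySem.Str.slice text none (some (-1)) else text
  -- num = digits only; mapped = num.translate(...)
  pvBGroup ((text'.toList.filter PySem.Chars.isdigit).map pvMaketrans)

-- ===== PRECONDITION & SPEC =====
def Spec_price_digits_converter (text : String) (out : String) : Prop := out = price_digits_converter_alt text
instance (text : String) (out : String) : Decidable (Spec_price_digits_converter text out) := by unfold Spec_price_digits_converter; infer_instance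

-- ===== CLAIM (what is proved, stated in full; the proofs are below) =====
def Claim_equal_price_digits_converter : Prop := ∀ (text : String), Dom_price_digits_converter text → Spec_price_digits_converter text (price_digits_converter text)

-- ===== LEMMAS AND PROOFS =====

-- two Strings with the same code points are equal
theorem pvStrEq {s t : String} (h : s.toList = t.toList) : s = t := by
  have := congrArg String.ofList h
  simpa using this

-- Char facts for the ten digits
theorem pvCharEq {c d : Char} (h : c.toNat = d.toNat) : c = d := by
  apply Char.ext
  exact UInt32.toNat_inj.mp h

-- the dict lookup of A agrees with the translation table of B on every digit
theorem pvDict_toList {c : Char} (h : PySem.Chars.isdigit c = true) :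
    (PySem.Dict.getD pvPersianNumbers c "").toList = [pvMaketrans c] := by
  simp only [PySem.Chars.isdigit, Bool.and_eq_true, decide_eq_true_eq] at h
  obtain ⟨h1, h2⟩ := h
  have hl : 48 ≤ c.toNat := h1
  have hr : c.toNat ≤ 57 := h2
  have : c.toNat = 48 ∨ c.toNat = 49 ∨ c.toNat = 50 ∨ c.toNat = 51 ∨ c.toNat = 52 ∨
      c.toNat = 53 ∨ c.toNat = 54 ∨ c.toNat = 55 ∨ c.toNat = 56 ∨ c.toNat = 57 := by omega
  rcases this with h|h|h|h|h|h|h|h|h|h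
  · rw [pvCharEq (c := c) (d := '0') (by rw [h]; decide)]; decide
  · rw [pvCharEq (c := c) (d := '1') (by rw [h]; decide)]; decide
  · rw [pvCharEq (c := c) (d := '2') (by rw [h]; decide)]; decide
  · rw [pvCharEq (c := c) (d := '3') (by rw [h]; decide)]; decide
  · rw [pvCharEq (c := c) (d := '4') (by rw [h]; decide)]; decide
  · rw [pvCharEq (c := c) (d := '5') (by rw [h]; decide)]; decide
  · rw [pvCharEq (c := c) (d := '6') (by rw [h]; decide)]; decide
  · rw [pvCharEq (c := c) (d := '7') (by rw [h]; decide)]; decide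
  · rw [pvCharEq (c := c) (d := '8') (by rw [h]; decide)]; decide
  · rw [pvCharEq (c := c) (d := '9') (by rw [h]; decide)]; decide

-- A's output, recursively: emit the digit's Persian form, then a separator
-- exactly when a positive multiple of three digits remains to the right
def pvAOut : List Char → List Char
  | [] => []
  | d :: ds => (PySem.Dict.getD pvPersianNumbers d "").toList ++
      (if 0 < ds.length ∧ ds.length % 3 = 0 then ['٬'] else []) ++ pvAOut ds

-- B's joined-chunks output read left to right over the REVERSED digit list:
-- a separator before position j exactly when 0 < j and j % 3 = 0
def pvF : List Char → Nat → List Char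
  | [], _ => []
  | x :: xs, j => (if j % 3 = 0 ∧ 0 < j then ['٬'] else []) ++ x :: pvF xs (j+1)

theorem pvFoldA (n : Int) : ∀ (l : List Char) (s : Nat) (acc : String),
    (s : Int) + l.length = n →
    ((PySem.List.enumerate l (s : Int)).foldl
      (fun result p =>
        let result := result ++ PySem.Dict.getD pvPersianNumbers p.2 ""
        if p.1 < n - 1 ∧ PySem.Int.mod (n - p.1 - 1) 3 = 0
        then result ++ "٬" else result) acc).toList
    = acc.toList ++ pvAOut l := by
  intro l
  induction l with
  | nil => intro s acc h; simp [PySem.List.enumerate, pvAOut]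
  | cons d ds ih =>
    intro s acc h
    simp only [List.length_cons] at h
    push_cast at h
    rw [PySem.List.enumerate_cons, List.foldl_cons]
    have hcast : (s : Int) + 1 = ((s + 1 : Nat) : Int) := by push_cast; ring
    rw [hcast, ih (s+1) _ (by push_cast; omega)]
    have hmod : PySem.Int.mod (n - (s : Int) - 1) 3 = (n - (s : Int) - 1) % 3 := by
      simp [PySem.Int.mod, Int.fmod_eq_emod]
    have hcond : ((s : Int) < n - 1 ∧ PySem.Int.mod (n - (s : Int) - 1) 3 = 0) ↔
        (0 < ds.length ∧ ds.length % 3 = 0) := by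
      rw [hmod]
      constructor
      · rintro ⟨ha, hb⟩; omega
      · rintro ⟨ha, hb⟩; omega
    by_cases hb : 0 < ds.length ∧ ds.length % 3 = 0
    · rw [if_pos (hcond.mpr hb)]
      simp [pvAOut, if_pos hb]
    · rw [if_neg (fun hx => hb (hcond.mp hx))]
      simp [pvAOut, if_neg hb]

-- shifting pvF's position index by a full group changes nothing (once past position 0)
theorem pvF_shift : ∀ (xs : List Char) (j : Nat), 1 ≤ j → pvF xs (j + 3) = pvF xs j := by
  intro xs
  induction xs with
  | nil => intro j _; rfl
  | cons x xs ih =>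
    intro j hj
    show (if (j+3) % 3 = 0 ∧ 0 < j+3 then ['٬'] else []) ++ x :: pvF xs (j+3+1)
       = (if j % 3 = 0 ∧ 0 < j then ['٬'] else []) ++ x :: pvF xs (j+1)
    have h1 : ((j+3) % 3 = 0 ∧ 0 < j+3) ↔ (j % 3 = 0 ∧ 0 < j) := by omega
    have h2 : j + 3 + 1 = (j + 1) + 3 := by omega
    rw [if_congr h1 rfl rfl, h2, ih (j+1) (by omega)]

-- appending one element on the right of pvF's argument
theorem pvF_snoc : ∀ (r : List Char) (x : Char) (j : Nat),
    pvF (r ++ [x]) j =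
      pvF r j ++ (if (j + r.length) % 3 = 0 ∧ 0 < j + r.length then ['٬'] else []) ++ [x] := by
  intro r
  induction r with
  | nil => intro x j; simp [pvF]
  | cons y r ih =>
    intro x j
    show (if j % 3 = 0 ∧ 0 < j then ['٬'] else []) ++ y :: pvF (r ++ [x]) (j+1)
       = ((if j % 3 = 0 ∧ 0 < j then ['٬'] else []) ++ y :: pvF r (j+1)) ++ _ ++ [x]
    rw [ih x (j+1)]
    simp only [List.length_cons, List.append_assoc, List.cons_append]
    have hjr : j + 1 + r.length = j + (r.length + 1) := by omega
    rw [hjr]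
    rfl

-- A's output reversed is pvF of the reversed translated digits
theorem pvAOut_reverse : ∀ (l : List Char), (∀ c ∈ l, PySem.Chars.isdigit c = true) →
    (pvAOut l).reverse = pvF ((l.map pvMaketrans).reverse) 0 := by
  intro l
  induction l with
  | nil => intro _; rfl
  | cons d ds ih =>
    intro hd
    have hdig : PySem.Chars.isdigit d = true := hd d (List.mem_cons_self ..)
    show ((PySem.Dict.getD pvPersianNumbers d "").toList ++
      (if 0 < ds.length ∧ ds.length % 3 = 0 then ['٬'] else []) ++ pvAOut ds).reverse = _
    rw [pvDict_toList hdig]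
    rw [List.map_cons, List.reverse_cons, pvF_snoc]
    rw [← ih (fun c hc => hd c (List.mem_cons_of_mem _ hc))]
    simp only [List.length_reverse, List.length_map, Nat.zero_add]
    by_cases hb : 0 < ds.length ∧ ds.length % 3 = 0
    · rw [if_pos hb, if_pos ⟨hb.2, hb.1⟩]; simp
    · rw [if_neg hb, if_neg (fun hx => hb ⟨hx.2, hx.1⟩)]; simp

-- pvF from position 0 is exactly the '٬'-join of the 3-chunks
theorem pvChunks3_nil : pvChunks3 [] = [] := by
  simp [pvChunks3]

theorem pvChunks3_cons (a : Char) (rest : List Char) :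
    pvChunks3 (a :: rest) = ((a :: rest).take 3) :: pvChunks3 (rest.drop 2) := by
  rw [pvChunks3]

theorem pvF_chunks : ∀ (n : Nat) (r : List Char), r.length ≤ n →
    pvF r 0 = PySem.Chars.join ['٬'] (pvChunks3 r) := by
  intro n
  induction n with
  | zero =>
    intro r h
    have : r = [] := List.eq_nil_of_length_eq_zero (by omega)
    subst this
    simp [pvF, pvChunks3_nil]
  | succ n ih =>
    intro r h
    match r with
    | [] => simp [pvF, pvChunks3_nil]
    | [a] => simp [pvF, pvChunks3_cons, pvChunks3_nil, PySem.Chars.join_singleton]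
    | [a, b] => simp [pvF, pvChunks3_cons, pvChunks3_nil, PySem.Chars.join_singleton]
    | a :: b :: c :: rest =>
      rw [show pvF (a :: b :: c :: rest) 0 = a :: b :: c :: pvF rest 3 from by simp [pvF]]
      rw [pvChunks3_cons]
      simp only [List.take_succ_cons, List.take_zero, List.drop_succ_cons, List.drop_zero]
      cases rest with
      | nil =>
        simp [pvF, pvChunks3_nil, PySem.Chars.join_singleton]
      | cons x xs =>
        have hxs : (x :: xs).length ≤ n := by
          simp only [List.length_cons] at h ⊢; omega
        have hshift : pvF (x :: xs) 3 = '٬' :: pvF (x :: xs) 0 := by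
          show (if 3 % 3 = 0 ∧ 0 < 3 then ['٬'] else []) ++ x :: pvF xs (3+1) = _
          rw [if_pos (by omega)]
          rw [show (3 + 1 : Nat) = 1 + 3 from rfl, pvF_shift xs 1 (by omega)]
          simp [pvF]
        rw [hshift, pvChunks3_cons x xs, PySem.Chars.join_cons_cons, ← pvChunks3_cons x xs]
        rw [ih (x :: xs) hxs]
        simp

-- the loop of A and the chunk-grouping of B agree on any all-digit list
theorem pvMain (l : List Char) (hd : ∀ c ∈ l, PySem.Chars.isdigit c = true) :
    pvALoop (String.ofList l) = pvBGroup (l.map pvMaketrans) := by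
  apply pvStrEq
  unfold pvALoop pvBGroup
  have hA := pvFoldA (PySem.Str.len (String.ofList l)) l 0 ""
    (by simp [PySem.Str.len_eq])
  simp only [String.toList_ofList, Nat.cast_zero] at hA ⊢
  rw [hA]
  have h1 : pvAOut l = (pvF ((l.map pvMaketrans).reverse) 0).reverse := by
    rw [← pvAOut_reverse l hd, List.reverse_reverse]
  rw [h1, pvF_chunks ((l.map pvMaketrans).reverse).length _ (le_refl _)]
  simp

-- ===== VERDICT (by name: the statement is the Claim_ definition above) =====
theorem price_digits_converter_spec : Claim_equal_price_digits_converter := by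
  unfold Claim_equal_price_digits_converter
  intro text _
  unfold Spec_price_digits_converter price_digits_converter price_digits_converter_alt
  generalize (if 1 < PySem.Str.len text then PySem.Str.slice text none (some (-1)) else text) = t
  exact pvMain (t.toList.filter PySem.Chars.isdigit)
    (fun c hc => (List.mem_filter.mp hc).2)
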